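-- pv_equiv track=rewrite | github.com/parafeu/USMB-Public | assignments/Session1/S1_algotools.py | max_value
-- ===== SOURCE A (Python) =====
-- def max_value(tab):
--     """
--     brief: get the maximum value of the list
--     Args:
--         tab: a list of numeric values, expects at least one positive values
--     Return:
--         the maximum value of the list
--         the index of maximum value
--     Raises:
--         ValueError if no positive value is found
--         ValueError if first argument is not a list
--     """
--
--     maxValue=0
--     maxValueIndex=-99
--     nPositiveValues=0
--     i=0
--
--     if not(isinstance(tab, list)):
--         raise ValueError('Expected a list as input')
--
--     while i < len(tab):
--         if tab[i] > 0:
--             nPositiveValues+=1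
--             if tab[i] > maxValue:
--                 maxValue=tab[i]
--                 maxValueIndex=i
--         i+=1
--     if nPositiveValues <= 0:
--         raise ValueError('No positive value found')
--
--     return [maxValue, maxValueIndex]
-- ===== SOURCE B (Python) =====
-- def max_value(tab):
--     if not isinstance(tab, list):
--         raise ValueError('Expected a list as input')
--     positives = [x for x in tab if x > 0]
--     if not positives:
--         raise ValueError('No positive value found')
--     m = max(positives)
--     return [m, tab.index(m)]
-- ===== Notes on version B (the rewrite author's own statement) =====
-- stated objective: simpler
-- what changed: Replaces the manual index-counting while-loop with running max/index/count state by a filter comprehension, max(), and tab.index() to recover the first occurrence.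
import Mathlib
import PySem

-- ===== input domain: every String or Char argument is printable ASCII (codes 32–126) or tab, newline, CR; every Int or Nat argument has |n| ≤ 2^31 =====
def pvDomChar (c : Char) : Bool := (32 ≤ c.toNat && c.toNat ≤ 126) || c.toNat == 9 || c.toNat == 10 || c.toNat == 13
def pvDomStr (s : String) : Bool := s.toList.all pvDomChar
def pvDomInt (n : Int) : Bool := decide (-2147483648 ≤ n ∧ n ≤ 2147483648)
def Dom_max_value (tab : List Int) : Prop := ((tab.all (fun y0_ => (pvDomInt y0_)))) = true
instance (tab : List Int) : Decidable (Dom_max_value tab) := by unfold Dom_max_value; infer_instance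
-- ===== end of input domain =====

-- B replaces A's manual while-loop (running max / index / positive-count state) by
-- filter + max + first-index lookup; objective: simpler. Equivalence proved on Pre_
-- (tab contains a positive value); elsewhere both Pythons raise ValueError.


-- ===== PORT A =====
-- the while-loop of A, carrying (maxValue, maxValueIndex, nPositiveValues), i the running index
def maxLoopA : List Int → Int → Int × Int × Int → Int × Int × Int
  | [], _, s => s
  | x :: xs, i, (mv, mi, np) =>
      maxLoopA xs (i + 1)
        (if 0 < x then (if mv < x then (x, i, np + 1) else (mv, mi, np + 1)) else (mv, mi, np))

def max_value (tab : List Int) : List Int :=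
  let s := maxLoopA tab 0 (0, -99, 0)
  if s.2.2 ≤ 0 then [] else [s.1, s.2.1]   -- np <= 0: Python raises ValueError (outside Pre_)

-- ===== PORT B =====
def max_value_alt (tab : List Int) : List Int :=
  let positives := tab.filter (fun x => decide (0 < x))
  match PySem.List.max? positives (fun y => y) with
  | none => []                              -- positives empty: Python raises ValueError (outside Pre_)
  | some m => [m, ((PySem.List.index? tab m).getD 0 : Nat)]

-- ===== PRECONDITION & SPEC =====
-- Pre_ excludes exactly the inputs with no positive element, where both A and B raise ValueError.
def Pre_max_value (tab : List Int) : Prop := ∃ x ∈ tab, 0 < x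
instance (tab : List Int) : Decidable (Pre_max_value tab) := by unfold Pre_max_value; infer_instance
def pvWitness_max_value : List Int := [3, -1, 7, 7, 2]

def Spec_max_value (tab : List Int) (out : List Int) : Prop := out = max_value_alt tab
instance (tab : List Int) (out : List Int) : Decidable (Spec_max_value tab out) := by unfold Spec_max_value; infer_instance

-- ===== CLAIM (what is proved, stated in full; the proofs are below) =====
def Claim_equal_max_value : Prop := ∀ (tab : List Int), Dom_max_value tab → Pre_max_value tab → Spec_max_value tab (max_value tab)

-- ===== LEMMAS AND PROOFS =====

lemma foldl_max_mem (l : List Int) : ∀ a : Int, l.foldl max a = a ∨ l.foldl max a ∈ l := by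
  induction l with
  | nil => intro a; left; rfl
  | cons x xs ih =>
    intro a
    rcases ih (max a x) with h | h
    · rcases max_choice a x with hc | hc
      · left; rw [List.foldl_cons, h, hc]
      · right; rw [List.foldl_cons, h, hc]; exact List.mem_cons_self
    · right; exact List.mem_cons_of_mem x h

-- first index of the (positive) max over a cons: shared by all three branches below
lemma index_cons_shift (x M : Int) (xs : List Int) (hne : x ≠ M) (hMmem : M ∈ xs) :
    (((PySem.List.index? (x :: xs) M).getD 0 : Nat) : Int)
      = 1 + (((PySem.List.index? xs M).getD 0 : Nat) : Int) := by
  obtain ⟨k, hk⟩ := Option.isSome_iff_exists.mp ((PySem.List.index?_isSome_iff xs M).2 hMmem)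
  rw [PySem.List.index?_cons_of_ne xs hne, hk]
  simp; omega

lemma loopA_spec (xs : List Int) : ∀ (i mv mi np : Int), 0 ≤ mv →
    maxLoopA xs i (mv, mi, np) =
      ((xs.filter (fun x => decide (0 < x))).foldl max mv,
       (if mv < (xs.filter (fun x => decide (0 < x))).foldl max mv
          then i + (((PySem.List.index? xs ((xs.filter (fun x => decide (0 < x))).foldl max mv)).getD 0 : Nat) : Int)
          else mi),
       np + (xs.filter (fun x => decide (0 < x))).length) := by
  induction xs with
  | nil => intro i mv mi np h; simp [maxLoopA]
  | cons x xs ih =>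
    intro i mv mi np hmv
    -- abbreviation for the tail's running max from a seed
    by_cases hx : 0 < x
    · have hfilter : (x :: xs).filter (fun x => decide (0 < x))
          = x :: xs.filter (fun x => decide (0 < x)) := by simp [hx]
      by_cases hcmp : mv < x
      · -- positive and larger: state updates to (x, i, np+1)
        have hxle : x ≤ (xs.filter (fun x => decide (0 < x))).foldl max x :=
          (PySem.List.le_foldl_max _ _).1
        have hstep : maxLoopA (x :: xs) i (mv, mi, np) = maxLoopA xs (i+1) (x, i, np+1) := by
          simp [maxLoopA, hx, hcmp]
        have hfold : (x :: xs.filter (fun x => decide (0 < x))).foldl max mv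
            = (xs.filter (fun x => decide (0 < x))).foldl max x := by
          rw [List.foldl_cons, max_eq_right (le_of_lt hcmp)]
        rw [hstep, ih (i+1) x i (np+1) (le_of_lt hx), hfilter, hfold]
        refine congrArg₂ Prod.mk rfl (congrArg₂ Prod.mk ?_ (by simp [List.length_cons]; omega))
        have hmvM : mv < (xs.filter (fun x => decide (0 < x))).foldl max x :=
          lt_of_lt_of_le hcmp hxle
        rw [if_pos hmvM]
        by_cases hxM : x = (xs.filter (fun x => decide (0 < x))).foldl max x
        · rw [if_neg (by omega), ← hxM, PySem.List.index?_cons_self]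
          simp
        · have hxltM : x < (xs.filter (fun x => decide (0 < x))).foldl max x :=
            lt_of_le_of_ne hxle hxM
          have hMmem : (xs.filter (fun x => decide (0 < x))).foldl max x ∈ xs := by
            rcases foldl_max_mem (xs.filter (fun x => decide (0 < x))) x with h | h
            · exact absurd h.symm hxM
            · exact List.mem_of_mem_filter h
          rw [if_pos hxltM, index_cons_shift x _ xs hxM hMmem]
          omega
      · -- positive but not larger: only np changes
        have hstep : maxLoopA (x :: xs) i (mv, mi, np) = maxLoopA xs (i+1) (mv, mi, np+1) := by
          simp [maxLoopA, hx, hcmp]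
        have hfold : (x :: xs.filter (fun x => decide (0 < x))).foldl max mv
            = (xs.filter (fun x => decide (0 < x))).foldl max mv := by
          rw [List.foldl_cons, max_eq_left (by omega)]
        rw [hstep, ih (i+1) mv mi (np+1) hmv, hfilter, hfold]
        refine congrArg₂ Prod.mk rfl (congrArg₂ Prod.mk ?_ (by simp [List.length_cons]; omega))
        by_cases hmvM : mv < (xs.filter (fun x => decide (0 < x))).foldl max mv
        · have hxM : x ≠ (xs.filter (fun x => decide (0 < x))).foldl max mv := by omega
          have hMmem : (xs.filter (fun x => decide (0 < x))).foldl max mv ∈ xs := by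
            rcases foldl_max_mem (xs.filter (fun x => decide (0 < x))) mv with h | h
            · omega
            · exact List.mem_of_mem_filter h
          rw [if_pos hmvM, if_pos hmvM, index_cons_shift x _ xs hxM hMmem]
          omega
        · rw [if_neg hmvM, if_neg hmvM]
    · -- nonpositive: skipped entirely
      have hfilter : (x :: xs).filter (fun x => decide (0 < x))
          = xs.filter (fun x => decide (0 < x)) := by simp [hx]
      have hstep : maxLoopA (x :: xs) i (mv, mi, np) = maxLoopA xs (i+1) (mv, mi, np) := by
        simp [maxLoopA, hx]
      rw [hstep, ih (i+1) mv mi np hmv, hfilter]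
      refine congrArg₂ Prod.mk rfl (congrArg₂ Prod.mk ?_ rfl)
      by_cases hmvM : mv < (xs.filter (fun x => decide (0 < x))).foldl max mv
      · have hxM : x ≠ (xs.filter (fun x => decide (0 < x))).foldl max mv := by omega
        have hMmem : (xs.filter (fun x => decide (0 < x))).foldl max mv ∈ xs := by
          rcases foldl_max_mem (xs.filter (fun x => decide (0 < x))) mv with h | h
          · omega
          · exact List.mem_of_mem_filter h
        rw [if_pos hmvM, if_pos hmvM, index_cons_shift x _ xs hxM hMmem]
        omega
      · rw [if_neg hmvM, if_neg hmvM]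

-- ===== VERDICT (by name: the statement is the Claim_ definition above) =====
theorem max_value_spec : Claim_equal_max_value := by
  intro tab _ hpre
  unfold Spec_max_value max_value max_value_alt
  obtain ⟨x0, hx0mem, hx0pos⟩ := hpre
  have hmemf : x0 ∈ tab.filter (fun x => decide (0 < x)) :=
    List.mem_filter.2 ⟨hx0mem, by simpa using hx0pos⟩
  obtain ⟨p, ps, hps⟩ : ∃ p ps, tab.filter (fun x => decide (0 < x)) = p :: ps := by
    cases hfe : tab.filter (fun x => decide (0 < x)) with
    | nil => rw [hfe] at hmemf; simp at hmemf
    | cons p ps => exact ⟨p, ps, rfl⟩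
  have hppos : (0 : Int) < p := by
    have : p ∈ tab.filter (fun x => decide (0 < x)) := by rw [hps]; simp
    simpa using (List.mem_filter.1 this).2
  rw [loopA_spec tab 0 0 (-99) 0 le_rfl]
  have hfold : (tab.filter (fun x => decide (0 < x))).foldl max 0 = ps.foldl max p := by
    rw [hps, List.foldl_cons, max_eq_right (le_of_lt hppos)]
  have hMpos : (0 : Int) < ps.foldl max p :=
    lt_of_lt_of_le hppos (PySem.List.le_foldl_max ps p).1
  have hmax? : PySem.List.max? (tab.filter (fun x => decide (0 < x))) (fun y => y)
      = some (ps.foldl max p) := by rw [hps]; exact PySem.List.max?_id_cons _ _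
  have hlen : ¬ (((tab.filter (fun x => decide (0 < x))).length : Int) ≤ 0) := by
    rw [hps]; simp
  simp only [hmax?, zero_add]
  rw [hfold, if_neg hlen, if_pos hMpos]
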